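-- pv_equiv track=rewrite | github.com/animeshokhade/dsa | scaler/Single Number III.py | solve
-- ===== SOURCE A (Python) =====
-- def solve(A):
--     lookup = set()
--
--     for number in A:
--         if number in lookup:
--             lookup.remove(number)
--         elif number not in lookup:
--             lookup.add(number)
--
--     return sorted(lookup)
-- ===== SOURCE B (Python) =====
-- def solve(A):
--     counts = {}
--     for number in A:
--         counts[number] = counts.get(number, 0) + 1
--     return sorted(k for k, v in counts.items() if v % 2 == 1)
-- ===== Notes on version B (the rewrite author's own statement) =====
-- stated objective: alternative
-- what changed: Replaces the live odd-parity toggle set (conditional add/remove per element) with a build-then-filter shape: one pass accumulates full frequency counts in a dict, a second pass keeps the keys with odd count, then sorts.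
import Mathlib
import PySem

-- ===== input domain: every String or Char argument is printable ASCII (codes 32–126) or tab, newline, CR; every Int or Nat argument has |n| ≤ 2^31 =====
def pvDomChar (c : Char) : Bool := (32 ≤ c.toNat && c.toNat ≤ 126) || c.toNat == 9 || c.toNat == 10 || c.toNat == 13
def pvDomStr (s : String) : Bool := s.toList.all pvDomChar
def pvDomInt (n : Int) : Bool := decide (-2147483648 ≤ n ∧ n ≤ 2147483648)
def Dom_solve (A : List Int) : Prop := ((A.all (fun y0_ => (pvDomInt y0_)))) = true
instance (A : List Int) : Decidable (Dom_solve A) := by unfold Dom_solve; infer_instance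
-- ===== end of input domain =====

-- B replaces A's live odd-parity toggle set with a count-then-filter shape (alternative structure, same cost).

-- ===== PORT A =====
-- 'lookup.remove(number)' is guarded by 'number in lookup', so it never raises; Set.discard is exact there.
def solve (A : List Int) : List Int :=
  let lookup : PySem.Set Int :=
    A.foldl (fun lookup number =>
      if PySem.Set.contains lookup number then PySem.Set.discard lookup number
      else if ¬ (PySem.Set.contains lookup number) then PySem.Set.add lookup number
      else lookup) PySem.Set.empty
  PySem.List.sorted lookup (fun x => x) false

-- ===== PORT B =====
def solve_alt (A : List Int) : List Int :=
  let counts : PySem.Dict Int Int :=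
    A.foldl (fun counts number => counts.insert number (counts.getD number 0 + 1)) PySem.Dict.empty
  PySem.List.sorted (((PySem.Dict.items counts).filter (fun p => p.2 % 2 == 1)).map Prod.fst)
    (fun x => x) false

-- ===== PRECONDITION & SPEC =====
def Spec_solve (A : List Int) (out : List Int) : Prop := out = solve_alt A
instance (A : List Int) (out : List Int) : Decidable (Spec_solve A out) := by unfold Spec_solve; infer_instance

-- ===== CLAIM (what is proved, stated in full; the proofs are below) =====
def Claim_equal_solve : Prop := ∀ (A : List Int), Dom_solve A → Spec_solve A (solve A)

-- ===== LEMMAS AND PROOFS =====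

-- the body of A's loop, named for the proofs
def pvStep (s : PySem.Set Int) (n : Int) : PySem.Set Int :=
  if PySem.Set.contains s n then PySem.Set.discard s n
  else if ¬ (PySem.Set.contains s n) then PySem.Set.add s n
  else s

lemma pvToggle_nodup (A : List Int) (s : PySem.Set Int) (hs : s.Nodup) :
    (A.foldl pvStep s).Nodup := by
  induction A generalizing s with
  | nil => exact hs
  | cons a t ih =>
    simp only [List.foldl_cons]
    apply ih
    unfold pvStep
    split_ifs
    · exact PySem.Set.nodup_discard s a hs
    · exact PySem.Set.nodup_add s a hs

lemma pvToggle_mem (A : List Int) (s : PySem.Set Int) (x : Int) :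
    (x ∈ A.foldl pvStep s ↔ (x ∈ s ↔ A.count x % 2 = 0)) := by
  induction A generalizing s with
  | nil => simp
  | cons a t ih =>
    simp only [List.foldl_cons]
    rw [ih]
    by_cases hx : x = a
    · subst hx
      rw [List.count_cons_self]
      unfold pvStep
      by_cases h1 : x ∈ s
      · rw [if_pos (by simpa [PySem.Set.contains_iff] using h1)]
        simp [PySem.Set.mem_discard, h1]
        omega
      · rw [if_neg (by simpa [PySem.Set.contains_iff] using h1),
            if_pos (by simpa [PySem.Set.contains_iff] using h1)]
        simp [h1]
        omega
    · have hstep : x ∈ pvStep s a ↔ x ∈ s := by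
        unfold pvStep
        split_ifs <;> simp [PySem.Set.mem_discard, PySem.Set.mem_add, hx]
      have hc : List.count x (a :: t) = List.count x t := by
        simp [Ne.symm hx]
      rw [hstep, hc]

lemma pvToggle_mem_empty (A : List Int) (x : Int) :
    (x ∈ A.foldl pvStep PySem.Set.empty ↔ A.count x % 2 = 1) := by
  rw [pvToggle_mem]
  simp only [PySem.Set.empty, List.not_mem_nil, false_iff]
  omega

lemma pvB_eq_filter (A : List Int) :
    ((PySem.Dict.items (A.foldl (fun counts number =>
        counts.insert number (counts.getD number 0 + 1)) (PySem.Dict.empty : PySem.Dict Int Int))).filter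
      (fun p => p.2 % 2 == 1)).map Prod.fst
    = (PySem.Set.ofList A).filter (fun k => ((A.count k : Int) % 2 == 1)) := by
  have hcnt : (A.foldl (fun counts number => counts.insert number (counts.getD number 0 + 1))
      (PySem.Dict.empty : PySem.Dict Int Int)) = PySem.Dict.counter A :=
    PySem.Dict.foldl_insert_getD_add_one_eq_counter A
  rw [hcnt, PySem.Dict.items_counter, List.filter_map, List.map_map]
  simp [Function.comp_def]

-- ===== VERDICT (by name: the statement is the Claim_ definition above) =====
theorem solve_spec : Claim_equal_solve := by
  intro A _
  show solve A = solve_alt A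
  show PySem.List.sorted (A.foldl pvStep PySem.Set.empty) (fun x => x) false
      = PySem.List.sorted (((PySem.Dict.items (A.foldl (fun counts number =>
          counts.insert number (counts.getD number 0 + 1)) (PySem.Dict.empty : PySem.Dict Int Int))).filter
            (fun p => p.2 % 2 == 1)).map Prod.fst) (fun x => x) false
  rw [pvB_eq_filter]
  apply PySem.List.sorted_eq_sorted_of_perm _ _ _ (fun a b h => h)
  rw [List.perm_ext_iff_of_nodup (pvToggle_nodup A PySem.Set.empty List.nodup_nil)
      (List.Nodup.filter _ (PySem.Set.nodup_ofList A))]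
  intro x
  rw [pvToggle_mem_empty A x]
  simp only [List.mem_filter, PySem.Set.mem_ofList, beq_iff_eq]
  constructor
  · intro h
    exact ⟨List.count_pos_iff.mp (by omega), by omega⟩
  · rintro ⟨-, h⟩
    omega
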